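-- pv_equiv track=rewrite | github.com/unravel11/unravel11.github.io | scripts/fetch_papers.py | merge_papers
-- ===== SOURCE A (Python) =====
-- MAX_PAPERS = 50  # Keep latest 50 papers
--
-- def merge_papers(existing, new_ones):
--     # Use a set of IDs to avoid duplicates
--     existing_ids = {p['id'] for p in existing}
--     merged = []
--
--     # Add new ones first
--     for p in new_ones:
--         if p['id'] not in existing_ids:
--             merged.append(p)
--             existing_ids.add(p['id'])
--
--     # Add old ones
--     merged.extend(existing)
--
--     # Sort by date descending
--     merged.sort(key=lambda x: x['date'], reverse=True)
--
--     return merged[:MAX_PAPERS]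
-- ===== SOURCE B (Python) =====
-- MAX_PAPERS = 50  # Keep latest 50 papers
--
--
-- def _insert_desc(p, top):
--     """Insert p into the descending-by-date list top, after all entries with
--     an equal-or-later date (stable descending insertion)."""
--     if not top or top[0]['date'] < p['date']:
--         return [p] + top
--     return [top[0]] + _insert_desc(p, top[1:])
--
--
-- def merge_papers(existing, new_ones):
--     # One bounded partial-selection pass: keep only the current top MAX_PAPERS,
--     # descending by date, instead of sorting the whole merged list.
--     seen = {p['id'] for p in existing}
--     top = []
--     for p in new_ones:
--         if p['id'] not in seen:
--             seen.add(p['id'])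
--             top = _insert_desc(p, top)[:MAX_PAPERS]
--     for p in existing:
--         top = _insert_desc(p, top)[:MAX_PAPERS]
--     return top
-- ===== Notes on version B (the rewrite author's own statement) =====
-- stated objective: alternative
-- what changed: Replaces A's full stable descending sort of the merged list followed by a [:50] slice with a single bounded partial-selection pass that inserts each paper (unseen new ones, then existing ones) into a descending-by-date buffer kept truncated to 50 entries.
import Mathlib
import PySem

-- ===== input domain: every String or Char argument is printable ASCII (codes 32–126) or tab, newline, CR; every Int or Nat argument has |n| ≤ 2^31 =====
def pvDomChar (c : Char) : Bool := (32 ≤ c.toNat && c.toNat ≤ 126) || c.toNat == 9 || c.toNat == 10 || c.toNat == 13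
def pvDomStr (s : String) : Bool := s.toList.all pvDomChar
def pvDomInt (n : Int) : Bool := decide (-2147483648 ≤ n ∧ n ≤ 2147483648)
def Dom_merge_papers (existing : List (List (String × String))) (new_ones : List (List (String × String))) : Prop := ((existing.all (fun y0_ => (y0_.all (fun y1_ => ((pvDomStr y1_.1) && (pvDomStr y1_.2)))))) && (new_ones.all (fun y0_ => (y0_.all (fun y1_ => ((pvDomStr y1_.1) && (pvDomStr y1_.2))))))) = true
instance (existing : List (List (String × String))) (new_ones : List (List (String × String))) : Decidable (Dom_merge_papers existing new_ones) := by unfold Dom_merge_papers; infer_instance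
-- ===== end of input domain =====

-- B replaces A's full stable descending sort + [:50] slice by a single bounded partial-selection
-- pass: each paper is inserted into a ≤50-element descending-by-date buffer that is truncated to
-- 50 after every insertion (objective: alternative algorithm, same return value).

-- shared field accessor: p[k] on a paper dict (first match), total form used under Pre_
def pvKey (p : List (String × String)) (k : String) : String :=
  (PySem.Dict.mk p).getD k ""

-- ===== PORT A =====
-- Python A: set of existing ids, append unseen new papers, extend with existing,
-- stable sort by 'date' descending, slice [:50] (a nonnegative-literal slice = List.take 50).
def merge_papers (existing : List (List (String × String))) (new_ones : List (List (String × String))) : List (List (String × String)) :=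
  let existing_ids : PySem.Set String :=
    PySem.Set.ofList (existing.map (fun p => pvKey p "id"))
  let st := new_ones.foldl
    (fun (st : List (List (String × String)) × PySem.Set String) p =>
      if (pvKey p "id") ∈ st.2 then st
      else (st.1 ++ [p], PySem.Set.add st.2 (pvKey p "id")))
    ([], existing_ids)
  let merged := st.1 ++ existing
  let merged := PySem.List.sorted merged (fun x => pvKey x "date") true
  merged.take 50

-- ===== PORT B =====
-- B's helper _insert_desc: stable descending insertion by 'date'.
def pvInsertDesc (p : List (String × String)) : List (List (String × String)) → List (List (String × String))
  | [] => [p]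
  | q :: t =>
      if pvKey q "date" < pvKey p "date" then p :: q :: t
      else q :: pvInsertDesc p t

def merge_papers_alt (existing : List (List (String × String))) (new_ones : List (List (String × String))) : List (List (String × String)) :=
  let seen : PySem.Set String :=
    PySem.Set.ofList (existing.map (fun p => pvKey p "id"))
  let st := new_ones.foldl
    (fun (st : List (List (String × String)) × PySem.Set String) p =>
      if (pvKey p "id") ∈ st.2 then st
      else ((pvInsertDesc p st.1).take 50, PySem.Set.add st.2 (pvKey p "id")))
    ([], seen)
  existing.foldl (fun top p => (pvInsertDesc p top).take 50) st.1

-- ===== PRECONDITION & SPEC =====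
-- Pre_ excludes exactly the inputs where Python A raises KeyError: an existing paper without an
-- 'id' or 'date' key, a new paper without an 'id' key, or a new paper that reaches the merged
-- list (id fresh w.r.t. existing and not a repeat of an earlier new paper) without a 'date' key.
def Pre_merge_papers (existing : List (List (String × String))) (new_ones : List (List (String × String))) : Prop :=
  (∀ p ∈ existing, ((PySem.Dict.mk p).get? "id").isSome ∧ ((PySem.Dict.mk p).get? "date").isSome) ∧
  (∀ p ∈ new_ones, ((PySem.Dict.mk p).get? "id").isSome) ∧
  (∀ i ∈ List.range new_ones.length,
    ((∀ q ∈ existing, pvKey q "id" ≠ pvKey (new_ones.getD i []) "id") ∧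
     (∀ j ∈ List.range i, pvKey (new_ones.getD j []) "id" ≠ pvKey (new_ones.getD i []) "id")) →
    ((PySem.Dict.mk (new_ones.getD i [])).get? "date").isSome)
instance (existing : List (List (String × String))) (new_ones : List (List (String × String))) : Decidable (Pre_merge_papers existing new_ones) := by unfold Pre_merge_papers; infer_instance

def pvWitness_merge_papers : (List (List (String × String))) × (List (List (String × String))) :=
  ([[("id", "a"), ("date", "2023-01-02")]],
   [[("id", "b"), ("date", "2024-05-01")], [("id", "a")]])

def Spec_merge_papers (existing : List (List (String × String))) (new_ones : List (List (String × String))) (out : List (List (String × String))) : Prop := out = merge_papers_alt existing new_ones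
instance (existing : List (List (String × String))) (new_ones : List (List (String × String))) (out : List (List (String × String))) : Decidable (Spec_merge_papers existing new_ones out) := by unfold Spec_merge_papers; infer_instance

-- ===== CLAIM (what is proved, stated in full; the proofs are below) =====
def Claim_equal_merge_papers : Prop := ∀ (existing : List (List (String × String))) (new_ones : List (List (String × String))), Dom_merge_papers existing new_ones → Pre_merge_papers existing new_ones → Spec_merge_papers existing new_ones (merge_papers existing new_ones)

-- ===== LEMMAS AND PROOFS =====

-- B's hand-written insertion is PySem's insertBy with the reversed date comparison.
lemma pvInsertDesc_eq_insertBy (p : List (String × String)) (l : List (List (String × String))) :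
    pvInsertDesc p l =
      PySem.List.insertBy (fun a b => decide (pvKey b "date" < pvKey a "date")) p l := by
  induction l with
  | nil => simp [pvInsertDesc, PySem.List.insertBy]
  | cons q t ih => simp [pvInsertDesc, PySem.List.insertBy, ih]

-- Truncating the buffer before an insertion does not change the truncated result.
lemma take_insertBy {α : Type} (b : α → α → Bool) (x : α) (l : List α) (k : Nat) :
    (PySem.List.insertBy b x (l.take k)).take k = (PySem.List.insertBy b x l).take k := by
  induction l generalizing k with
  | nil => simp
  | cons q t ih =>
    cases k with
    | zero => simp [PySem.List.insertBy]
    | succ k' =>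
      simp only [List.take_succ_cons, PySem.List.insertBy]
      by_cases h : b x q = true
      · simp only [h, if_pos]
        cases k' with
        | zero => simp
        | succ m =>
          simp [List.take_take]
      · simp only [h, Bool.false_eq_true, if_false, List.take_succ_cons, ih]

-- Folding truncated insertions equals folding plain insertions and truncating once.
lemma foldl_take_insertBy {α : Type} (b : α → α → Bool) (k : Nat) (xs : List α) (l : List α) :
    xs.foldl (fun top p => (PySem.List.insertBy b p top).take k) (l.take k)
      = (xs.foldl (fun top p => PySem.List.insertBy b p top) l).take k := by
  induction xs generalizing l with
  | nil => simp
  | cons x xs ih =>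
    simp only [List.foldl_cons]
    rw [take_insertBy, ih]

-- The dedup loops of A and B walk the same id set; B's buffer tracks the truncated
-- insertion fold of A's merged list.
lemma dedup_loops_agree (b : List (String × String) → List (String × String) → Bool)
    (ns : List (List (String × String))) (m : List (List (String × String))) (ids : PySem.Set String) :
    ns.foldl
      (fun (st : List (List (String × String)) × PySem.Set String) p =>
        if (pvKey p "id") ∈ st.2 then st
        else ((PySem.List.insertBy b p st.1).take 50, PySem.Set.add st.2 (pvKey p "id")))
      (m.foldl (fun top p => (PySem.List.insertBy b p top).take 50) [], ids)
    = ((ns.foldl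
          (fun (st : List (List (String × String)) × PySem.Set String) p =>
            if (pvKey p "id") ∈ st.2 then st
            else (st.1 ++ [p], PySem.Set.add st.2 (pvKey p "id")))
          (m, ids)).1.foldl (fun top p => (PySem.List.insertBy b p top).take 50) [],
       (ns.foldl
          (fun (st : List (List (String × String)) × PySem.Set String) p =>
            if (pvKey p "id") ∈ st.2 then st
            else (st.1 ++ [p], PySem.Set.add st.2 (pvKey p "id")))
          (m, ids)).2) := by
  induction ns generalizing m ids with
  | nil => simp
  | cons p ns ih =>
    simp only [List.foldl_cons]
    by_cases h : (pvKey p "id") ∈ ids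
    · simp only [h, if_pos, ih]
    · simp only [h, if_false]
      have hstep : (m ++ [p]).foldl (fun top q => (PySem.List.insertBy b q top).take 50) []
          = (PySem.List.insertBy b p (m.foldl (fun top q => (PySem.List.insertBy b q top).take 50) [])).take 50 := by
        simp [List.foldl_append]
      rw [← hstep]
      exact ih (m ++ [p]) _

-- ===== VERDICT (by name: the statement is the Claim_ definition above) =====
theorem merge_papers_spec : Claim_equal_merge_papers := by
  intro existing new_ones _ _
  unfold Spec_merge_papers
  simp only [merge_papers, merge_papers_alt, pvInsertDesc_eq_insertBy]
  rw [PySem.List.sorted_rev_eq_foldl_insertBy]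
  rw [List.foldl_append]
  rw [← foldl_take_insertBy]
  rw [← foldl_take_insertBy]
  simp only [List.take_nil]
  have hd := dedup_loops_agree
    (fun a c => decide (pvKey c "date" < pvKey a "date"))
    new_ones []
    (PySem.Set.ofList (existing.map (fun p => pvKey p "id")))
  simp only [List.foldl_nil] at hd
  rw [hd]
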